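-- pv_equiv track=rewrite | github.com/ikerfernandezmolano/Apuntes-IngenieriaInformatica | ASIGNATURAS/PRIMERO DE CARRERA/PRIMER CUATRIMESTRE/PROGRAMACIÓN BÁSICA/Lab5/PYTHON/Ej3_prueba_primo_y_capicua_mayor/Ej3_prueba_primo_y_capicua_mayor.py | primo_y_capicua_mayor
-- ===== SOURCE A (Python) =====
-- def es_capicua(num):
--     numero=num
--     N_Inverso=0
--     capicua=False
--     if numero>=0 and numero<=9:
--         N_Inverso=numero
--     else:
--         while numero!=0:
--             N_Inverso=N_Inverso*10+(numero % 10)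
--             numero=numero//10
--     if N_Inverso==num:
--         capicua=True
--     return capicua
--
-- def es_primo(num):
--     primo=True
--     posible_multiplo=2
--     if num>3:
--         while primo and posible_multiplo!=num//2+1:
--             if num%posible_multiplo==0:
--                 primo=False
--             posible_multiplo=posible_multiplo+1
--     return primo
--
-- def primo_y_capicua_mayor(num):
--     x=0
--     primo_capymay=False
--     while primo_capymay==False:
--         x=x+1
--         if es_capicua(num+x):
--             if es_primo(num+x):
--                 primo_capicua_mayor=num+x
--                 primo_capymay=True
--     return primo_capicua_mayor
-- ===== SOURCE B (Python) =====
-- def _es_capicua_b(n):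
--     ds = []
--     while n >= 10:
--         ds.append(n % 10)
--         n //= 10
--     ds.append(n)
--     return ds == ds[::-1]
--
-- def _es_primo_b(n):
--     if n <= 3:
--         return True
--     d = 2
--     while d * d <= n:
--         if n % d == 0:
--             return False
--         d += 1
--     return True
--
-- def primo_y_capicua_mayor(num):
--     n = num + 1
--     while not (_es_capicua_b(n) and _es_primo_b(n)):
--         n += 1
--     return n
-- ===== Notes on version B (the rewrite author's own statement) =====
-- stated objective: faster
-- what changed: Primality by trial division only up to sqrt(n) instead of scanning all divisors up to n//2 (preserving A's n<=3 => 'prime' quirk), and the palindrome test compares the digit list with its reversal instead of rebuilding the reversed number arithmetically.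
import Mathlib
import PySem

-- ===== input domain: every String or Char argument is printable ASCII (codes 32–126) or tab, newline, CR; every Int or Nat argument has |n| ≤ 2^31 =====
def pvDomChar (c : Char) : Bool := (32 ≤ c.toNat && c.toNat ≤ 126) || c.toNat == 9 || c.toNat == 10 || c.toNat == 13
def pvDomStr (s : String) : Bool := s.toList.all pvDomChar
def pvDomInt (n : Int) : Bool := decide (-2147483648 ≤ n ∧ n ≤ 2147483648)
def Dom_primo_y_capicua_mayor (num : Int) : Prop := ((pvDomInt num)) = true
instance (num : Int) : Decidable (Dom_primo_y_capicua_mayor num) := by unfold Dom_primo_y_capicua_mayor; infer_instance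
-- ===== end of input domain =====

-- B replaces A's divisor scan up to num//2 by trial division up to sqrt(n) (keeping A's n<=3 => True quirk)
-- and tests palindromicity by comparing the digit list with its reversal instead of rebuilding the reversed number.

-- ===== PORT A =====

-- while numero != 0: N_Inverso = N_Inverso*10 + numero%10; numero //= 10
-- (for numero < 0 the Python loop never reaches 0 and diverges; such inputs are outside Pre_, the guard `0 < numero` only makes the definition total)
def pvCapLoopA (numero N_Inverso : Int) : Int :=
  if h : 0 < numero then
    pvCapLoopA (PySem.Int.floordiv numero 10) (N_Inverso * 10 + PySem.Int.mod numero 10)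
  else N_Inverso
termination_by numero.toNat
decreasing_by
  rw [PySem.Int.floordiv_eq_ediv_of_pos (by norm_num : (0:Int) < 10)]
  omega

def es_capicua (num : Int) : Bool :=
  let N_Inverso : Int := if 0 ≤ num ∧ num ≤ 9 then num else pvCapLoopA num 0
  N_Inverso == num

-- while primo and posible_multiplo != num//2+1: …  (fuel = exact number of iterations left)
def pvPrimoLoopA (fuel : Nat) (num pm : Int) : Bool :=
  match fuel with
  | 0 => true
  | f + 1 =>
    if pm = PySem.Int.floordiv num 2 + 1 then true
    else if PySem.Int.mod num pm = 0 then false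
    else pvPrimoLoopA f num (pm + 1)

def es_primo (num : Int) : Bool :=
  if num > 3 then pvPrimoLoopA (PySem.Int.floordiv num 2 + 1 - 2).toNat num 2 else true

-- while primo_capymay == False: x += 1; …  (fuel guard only; unreachable for inputs in Dom ∧ Pre_)
def pvMainLoopA (fuel : Nat) (num x : Int) : Int :=
  match fuel with
  | 0 => 0
  | f + 1 =>
    let x1 := x + 1
    if es_capicua (num + x1) && es_primo (num + x1) then num + x1
    else pvMainLoopA f num x1

def primo_y_capicua_mayor (num : Int) : Int := pvMainLoopA 1099511627776 num 0

-- ===== PORT B =====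

-- ds = []; while n >= 10: ds.append(n % 10); n //= 10
-- ds.append(n)
def pvDigitsB (n : Int) (ds : List Int) : List Int :=
  if h : 10 ≤ n then pvDigitsB (PySem.Int.floordiv n 10) (ds ++ [PySem.Int.mod n 10])
  else ds ++ [n]
termination_by n.toNat
decreasing_by
  rw [PySem.Int.floordiv_eq_ediv_of_pos (by norm_num : (0:Int) < 10)]
  omega

def es_capicua_b (n : Int) : Bool :=
  let ds := pvDigitsB n []
  ds == (PySem.List.slice? ds none none (-1)).getD []

-- d = 2; while d*d <= n: …; d += 1
def pvPrimoLoopB (n d : Int) : Bool :=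
  if h : d * d ≤ n then
    if PySem.Int.mod n d = 0 then false else pvPrimoLoopB n (d + 1)
  else true
termination_by (n + 2 - d).toNat
decreasing_by
  have h4 : 4 * (d * d - d) ≥ -1 := by nlinarith [sq_nonneg (2 * d - 1)]
  omega

def es_primo_b (n : Int) : Bool := if n ≤ 3 then true else pvPrimoLoopB n 2

-- n = num + 1; while not (pal and prime): n += 1  (same fuel guard as port A)
def pvMainLoopB (fuel : Nat) (n : Int) : Int :=
  match fuel with
  | 0 => 0
  | f + 1 => if es_capicua_b n && es_primo_b n then n else pvMainLoopB f (n + 1)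

def primo_y_capicua_mayor_alt (num : Int) : Int := pvMainLoopB 1099511627776 (num + 1)

-- ===== PRECONDITION & SPEC =====
-- Pre_ excludes num ≤ -2: there the first candidates are negative and Python's es_capicua
-- loops forever (numero//10 is stuck at -1), so A never returns.
def Pre_primo_y_capicua_mayor (num : Int) : Prop := -1 ≤ num
instance (num : Int) : Decidable (Pre_primo_y_capicua_mayor num) := by unfold Pre_primo_y_capicua_mayor; infer_instance
def pvWitness_primo_y_capicua_mayor : Int := 5

def Spec_primo_y_capicua_mayor (num : Int) (out : Int) : Prop := out = primo_y_capicua_mayor_alt num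
instance (num : Int) (out : Int) : Decidable (Spec_primo_y_capicua_mayor num out) := by unfold Spec_primo_y_capicua_mayor; infer_instance

-- ===== CLAIM (what is proved, stated in full; the proofs are below) =====
def Claim_equal_primo_y_capicua_mayor : Prop := ∀ (num : Int), Dom_primo_y_capicua_mayor num → Pre_primo_y_capicua_mayor num → Spec_primo_y_capicua_mayor num (primo_y_capicua_mayor num)

-- ===== LEMMAS AND PROOFS =====

-- value of a most-significant-first digit list
def pvVal (l : List Int) : Int := l.foldl (fun a d => a * 10 + d) 0

lemma pvVal_foldl (l : List Int) (a : Int) :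
    l.foldl (fun a d => a * 10 + d) a = a * 10 ^ l.length + pvVal l := by
  induction l generalizing a with
  | nil => simp [pvVal]
  | cons d t ih =>
    simp only [List.foldl_cons, List.length_cons]
    rw [ih (a * 10 + d)]
    have hv : pvVal (d :: t) = d * 10 ^ t.length + pvVal t := by
      simp only [pvVal, List.foldl_cons]
      rw [show (0:Int) * 10 + d = d from by ring, ih d]
      rfl
    rw [hv]
    ring

lemma pvVal_bounds (l : List Int) (h : ∀ d ∈ l, 0 ≤ d ∧ d < 10) :
    0 ≤ pvVal l ∧ pvVal l < 10 ^ l.length := by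
  induction l with
  | nil => simp [pvVal]
  | cons d t ih =>
    have hd := h d (by simp)
    have ht := ih (fun x hx => h x (by simp [hx]))
    have hval : pvVal (d :: t) = d * 10 ^ t.length + pvVal t := by
      simp only [pvVal, List.foldl_cons]
      have := pvVal_foldl t d
      simpa [pvVal] using this
    have hp : (0:Int) < 10 ^ t.length := by positivity
    rw [hval]
    constructor
    · nlinarith
    · have : (10:Int) ^ (d :: t).length = 10 * 10 ^ t.length := by
        rw [List.length_cons]; ring
      rw [this]; nlinarith

lemma pvVal_inj (l1 l2 : List Int) (hlen : l1.length = l2.length)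
    (h1 : ∀ d ∈ l1, 0 ≤ d ∧ d < 10) (h2 : ∀ d ∈ l2, 0 ≤ d ∧ d < 10)
    (hv : pvVal l1 = pvVal l2) : l1 = l2 := by
  induction l1 generalizing l2 with
  | nil => cases l2 with
    | nil => rfl
    | cons => simp at hlen
  | cons d1 t1 ih =>
    cases l2 with
    | nil => simp at hlen
    | cons d2 t2 =>
      have hlen' : t1.length = t2.length := by simpa using hlen
      have hb1 := pvVal_bounds t1 (fun x hx => h1 x (by simp [hx]))
      have hb2 := pvVal_bounds t2 (fun x hx => h2 x (by simp [hx]))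
      have hd1 := h1 d1 (by simp)
      have hd2 := h2 d2 (by simp)
      have e1 : pvVal (d1 :: t1) = d1 * 10 ^ t1.length + pvVal t1 := by
        simp only [pvVal, List.foldl_cons]
        simpa [pvVal] using pvVal_foldl t1 d1
      have e2 : pvVal (d2 :: t2) = d2 * 10 ^ t2.length + pvVal t2 := by
        simp only [pvVal, List.foldl_cons]
        simpa [pvVal] using pvVal_foldl t2 d2
      rw [e1, e2, hlen'] at hv
      have hp : (0:Int) < 10 ^ t2.length := by positivity
      rw [hlen'] at hb1
      have hdd : d1 = d2 := by
        rcases lt_trichotomy d1 d2 with hlt | heq | hgt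
        · nlinarith [mul_le_mul_of_nonneg_right (by omega : d1 + 1 ≤ d2) (le_of_lt hp)]
        · exact heq
        · nlinarith [mul_le_mul_of_nonneg_right (by omega : d2 + 1 ≤ d1) (le_of_lt hp)]
      have hvt : pvVal t1 = pvVal t2 := by
        rw [hdd] at hv; omega
      rw [hdd, ih t2 hlen' (fun x hx => h1 x (by simp [hx])) (fun x hx => h2 x (by simp [hx])) hvt]

-- least-significant-first digit list of n ≥ 0 (spec object shared by both proofs)
def pvDig (n : Int) : List Int :=
  if h : 10 ≤ n then (n % 10) :: pvDig (n / 10)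
  else [n]
termination_by n.toNat
decreasing_by
  omega

lemma pvDig_ok (n : Int) (hn : 0 ≤ n) : ∀ d ∈ pvDig n, 0 ≤ d ∧ d < 10 := by
  induction n using pvDig.induct with
  | case1 n h ih =>
    rw [pvDig, dif_pos h]
    intro d hd
    rcases List.mem_cons.1 hd with rfl | hd
    · exact ⟨Int.emod_nonneg n (by norm_num), Int.emod_lt_of_pos n (by norm_num)⟩
    · exact ih (Int.ediv_nonneg hn (by norm_num)) d hd
  | case2 n h =>
    rw [pvDig, dif_neg h]
    intro d hd
    simp at hd
    omega

lemma pvVal_dig_reverse (n : Int) (hn : 0 ≤ n) : pvVal (pvDig n).reverse = n := by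
  induction n using pvDig.induct with
  | case1 n h ih =>
    rw [pvDig, dif_pos h]
    simp only [List.reverse_cons, pvVal, List.foldl_append, List.foldl_cons, List.foldl_nil]
    have := ih (Int.ediv_nonneg hn (by norm_num))
    simp only [pvVal] at this
    rw [this]
    omega
  | case2 n h =>
    rw [pvDig, dif_neg h]
    simp [pvVal]

lemma pvCapLoopA_eq (n : Int) (hn : 1 ≤ n) (a : Int) :
    pvCapLoopA n a = (pvDig n).foldl (fun acc d => acc * 10 + d) a := by
  induction n using pvDig.induct generalizing a with
  | case1 n h ih =>
    rw [pvCapLoopA, dif_pos (by omega : 0 < n), pvDig, dif_pos h]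
    rw [PySem.Int.floordiv_eq_ediv_of_pos (by norm_num), PySem.Int.mod_eq_emod_of_pos (by norm_num)]
    have hq : 1 ≤ n / 10 := by
      have := Int.le_ediv_iff_mul_le (a := n) (b := 10) (c := 1) (by norm_num)
      omega
    rw [ih hq]
    simp
  | case2 n h =>
    rw [pvCapLoopA, dif_pos (by omega : 0 < n), pvDig, dif_neg h]
    rw [PySem.Int.floordiv_eq_ediv_of_pos (by norm_num), PySem.Int.mod_eq_emod_of_pos (by norm_num)]
    have hq : n / 10 = 0 := by omega
    have hm : n % 10 = n := by omega
    rw [hq, hm, pvCapLoopA]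
    simp

lemma pvDigitsB_eq (n : Int) (hn : 0 ≤ n) (ds : List Int) :
    pvDigitsB n ds = ds ++ pvDig n := by
  induction n using pvDig.induct generalizing ds with
  | case1 n h ih =>
    rw [pvDigitsB, dif_pos h, pvDig, dif_pos h]
    rw [PySem.Int.floordiv_eq_ediv_of_pos (by norm_num), PySem.Int.mod_eq_emod_of_pos (by norm_num)]
    rw [ih (Int.ediv_nonneg hn (by norm_num))]
    simp
  | case2 n h =>
    rw [pvDigitsB, dif_neg h, pvDig, dif_neg h]

lemma es_capicua_eq (c : Int) (hc : 0 ≤ c) : es_capicua c = es_capicua_b c := by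
  have hB : es_capicua_b c = ((pvDig c) == (pvDig c).reverse) := by
    simp only [es_capicua_b, pvDigitsB_eq c hc, List.nil_append,
      PySem.List.slice?_none_none_neg_one, Option.getD_some]
  have hiff : pvVal (pvDig c) = c ↔ pvDig c = (pvDig c).reverse := by
    constructor
    · intro hv
      exact pvVal_inj _ _ (by simp)
        (pvDig_ok c hc)
        (fun x hx => pvDig_ok c hc x (List.mem_reverse.1 hx))
        (by rw [hv, pvVal_dig_reverse c hc])
    · intro he
      calc pvVal (pvDig c) = pvVal (pvDig c).reverse := by rw [← he]
        _ = c := pvVal_dig_reverse c hc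
  have hA : es_capicua c = (pvVal (pvDig c) == c) := by
    by_cases h9 : 0 ≤ c ∧ c ≤ 9
    · have : pvDig c = [c] := by rw [pvDig, dif_neg (by omega)]
      simp [es_capicua, if_pos h9, this, pvVal]
    · have hc10 : 10 ≤ c := by omega
      simp only [es_capicua, if_neg h9]
      rw [pvCapLoopA_eq c (by omega) 0]
      have : (pvDig c).foldl (fun acc d => acc * 10 + d) 0 = pvVal (pvDig c) := rfl
      rw [this]
  rw [hA, hB]
  rcases em (pvVal (pvDig c) = c) with h | h
  · rw [beq_iff_eq.2 h, beq_iff_eq.2 (hiff.1 h)]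
  · rw [beq_eq_false_iff_ne.2 h, beq_eq_false_iff_ne.2 (fun he => h (hiff.2 he))]

lemma pvPrimoLoopA_char (num : Int) (f : Nat) (pm : Int)
    (hsum : pm + (f : Int) = num / 2 + 1) :
    (pvPrimoLoopA f num pm = true ↔ ∀ d, pm ≤ d → d ≤ num / 2 → ¬ (d ∣ num)) := by
  induction f generalizing pm with
  | zero =>
    push_cast at hsum
    simp only [pvPrimoLoopA]
    constructor
    · intro _ d hd1 hd2
      omega
    · intro _
      trivial
  | succ f ih =>
    push_cast at hsum
    have hne : pm ≠ PySem.Int.floordiv num 2 + 1 := by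
      rw [PySem.Int.floordiv_eq_ediv_of_pos (by norm_num)]
      omega
    rw [pvPrimoLoopA, if_neg hne]
    by_cases hdvd : PySem.Int.mod num pm = 0
    · rw [if_pos hdvd]
      have hpmdvd : pm ∣ num := (PySem.Int.mod_eq_zero_iff_dvd num pm).1 hdvd
      constructor
      · intro h; cases h
      · intro h
        exact absurd (h pm (le_refl pm) (by omega) hpmdvd) (fun x => x)
    · rw [if_neg hdvd]
      have hnd : ¬ (pm ∣ num) := fun hd => hdvd ((PySem.Int.mod_eq_zero_iff_dvd num pm).2 hd)
      rw [ih (pm + 1) (by omega)]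
      constructor
      · intro h d hd1 hd2
        rcases eq_or_lt_of_le hd1 with rfl | hlt
        · exact hnd
        · exact h d (by omega) hd2
      · intro h d hd1 hd2
        exact h d (by omega) hd2

lemma pvPrimoLoopB_char : ∀ (k : Nat) (n d : Int), k = (n + 2 - d).toNat → 2 ≤ d →
    (pvPrimoLoopB n d = true ↔ ∀ e, d ≤ e → e * e ≤ n → ¬ (e ∣ n)) := by
  intro k
  induction k using Nat.strong_induction_on with
  | _ k ih =>
    intro n d hk hd
    rw [pvPrimoLoopB]
    by_cases hle : d * d ≤ n
    · rw [dif_pos hle]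
      by_cases hdvd : PySem.Int.mod n d = 0
      · rw [if_pos hdvd]
        have hddvd : d ∣ n := (PySem.Int.mod_eq_zero_iff_dvd n d).1 hdvd
        constructor
        · intro h
          cases h
        · intro h
          exact absurd (h d (le_refl d) hle hddvd) (fun x => x)
      · rw [if_neg hdvd]
        have hnd : ¬ (d ∣ n) := fun hx => hdvd ((PySem.Int.mod_eq_zero_iff_dvd n d).2 hx)
        have hdn : d ≤ d * d := by
          have h4 : 4 * (d * d - d) ≥ -1 := by nlinarith [sq_nonneg (2 * d - 1)]
          omega
        rw [ih (n + 2 - (d + 1)).toNat (by omega) n (d + 1) rfl (by omega)]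
        constructor
        · intro h e he1 he2
          rcases eq_or_lt_of_le he1 with rfl | hlt
          · exact hnd
          · exact h e (by omega) he2
        · intro h e he1 he2
          exact h e (by omega) he2
    · rw [dif_neg hle]
      simp only [true_iff]
      intro e he1 he2 _
      have : d * d ≤ e * e := by nlinarith
      omega

lemma divisor_scan_iff (c : Int) (hc : 3 < c) :
    (∀ d, 2 ≤ d → d ≤ c / 2 → ¬ (d ∣ c)) ↔ (∀ d, 2 ≤ d → d * d ≤ c → ¬ (d ∣ c)) := by
  constructor
  · intro H d hd2 hdsq hdvd
    have hhalf : d ≤ c / 2 := by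
      have : d * 2 ≤ c := by nlinarith
      omega
    exact H d hd2 hhalf hdvd
  · intro H d hd2 hdhalf hdvd
    obtain ⟨e, he⟩ := hdvd
    have h2d : d * 2 ≤ c := by omega
    have he2 : 2 ≤ e := by nlinarith [he, h2d, hd2]
    by_cases hsq : d * d ≤ c
    · exact H d hd2 hsq ⟨e, he⟩
    · have hesq : e * e ≤ c := by
        by_contra hcon
        push_neg at hcon
        have hcc : c * c < (d * d) * (e * e) :=
          mul_lt_mul'' (by omega) hcon (by omega) (by omega)
        have heq2 : (d * d) * (e * e) = c * c := by rw [he]; ring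
        omega
      exact H e he2 hesq ⟨d, by rw [he]; ring⟩

lemma es_primo_eq (c : Int) : es_primo c = es_primo_b c := by
  by_cases h3 : c ≤ 3
  · simp [es_primo, es_primo_b, if_neg (by omega : ¬ c > 3), if_pos h3]
  · have hc : 3 < c := by omega
    simp only [es_primo, es_primo_b, if_pos hc, if_neg h3]
    have hfd : PySem.Int.floordiv c 2 = c / 2 := PySem.Int.floordiv_eq_ediv_of_pos (by norm_num)
    rw [hfd]
    have hhalf : 2 ≤ c / 2 := by omega
    have hA := pvPrimoLoopA_char c (c / 2 + 1 - 2).toNat 2 (by omega)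
    have hB := pvPrimoLoopB_char (c + 2 - 2).toNat c 2 (by omega) (le_refl 2)
    have hiff := (divisor_scan_iff c hc)
    have hab : (pvPrimoLoopA (c / 2 + 1 - 2).toNat c 2 = true) ↔ (pvPrimoLoopB c 2 = true) := by
      rw [hA, hB]
      exact hiff
    by_cases hb : pvPrimoLoopB c 2 = true
    · rw [hb, hab.2 hb]
    · have hb' : pvPrimoLoopB c 2 = false := by
        cases h : pvPrimoLoopB c 2
        · rfl
        · exact absurd h hb
      have ha' : pvPrimoLoopA (c / 2 + 1 - 2).toNat c 2 = false := by
        cases h : pvPrimoLoopA (c / 2 + 1 - 2).toNat c 2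
        · rfl
        · exact absurd (hab.1 h) hb
      rw [ha', hb']

lemma mainLoop_eq (f : Nat) (num x : Int) (h : -1 ≤ num + x) :
    pvMainLoopA f num x = pvMainLoopB f (num + x + 1) := by
  induction f generalizing x with
  | zero => rfl
  | succ f ih =>
    simp only [pvMainLoopA, pvMainLoopB]
    have hc : (0:Int) ≤ num + (x + 1) := by omega
    have hcap := es_capicua_eq (num + (x + 1)) hc
    have hpr := es_primo_eq (num + (x + 1))
    have harg : num + x + 1 = num + (x + 1) := by ring
    rw [harg, ← hcap, ← hpr]
    by_cases hfound : (es_capicua (num + (x + 1)) && es_primo (num + (x + 1))) = true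
    · rw [if_pos hfound, if_pos hfound]
    · rw [if_neg hfound, if_neg hfound, ih (x + 1) (by omega)]

-- ===== VERDICT (by name: the statement is the Claim_ definition above) =====
theorem primo_y_capicua_mayor_spec : Claim_equal_primo_y_capicua_mayor := by
  intro num _ hpre
  unfold Spec_primo_y_capicua_mayor primo_y_capicua_mayor primo_y_capicua_mayor_alt
  have := mainLoop_eq 1099511627776 num 0 (by unfold Pre_primo_y_capicua_mayor at hpre; omega)
  rw [this]
  norm_num
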